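-- pv_equiv track=rewrite | github.com/MichaelWave369/Vibe | vibe/agent_bridge.py | _rule_tokens
-- ===== SOURCE A (Python) =====
-- def _rule_tokens(values: list[str]) -> set[str]:
--     tokens: set[str] = set()
--     for raw in values:
--         t = raw.lower()
--         if "deterministic" in t:
--             tokens.add("deterministic")
--         if "stateless" in t:
--             tokens.add("stateless")
--         if "coherence" in t:
--             tokens.add("coherence_preserving")
--         if "sovereignty" in t or "bridge_critical" in t:
--             tokens.add("bridge_critical")
--         if "latency" in t:
--             tokens.add("latency_bounded")
--     return tokens
-- ===== SOURCE B (Python) =====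
-- _RULE_SPECS = [
--     ("deterministic", ("deterministic",)),
--     ("stateless", ("stateless",)),
--     ("coherence_preserving", ("coherence",)),
--     ("bridge_critical", ("sovereignty", "bridge_critical")),
--     ("latency_bounded", ("latency",)),
-- ]
--
-- def _rule_tokens(values: list[str]) -> set[str]:
--     # Worklist algorithm: keep only the rules not yet satisfied; each value is
--     # checked against the shrinking worklist, and we stop as soon as it is empty.
--     remaining = list(_RULE_SPECS)
--     found: list[str] = []
--     for raw in values:
--         if not remaining:
--             break
--         t = raw.lower()
--         hit = [spec for spec in remaining if any(s in t for s in spec[1])]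
--         remaining = [spec for spec in remaining if not any(s in t for s in spec[1])]
--         found += [tok for tok, _ in hit]
--     return set(found)
-- ===== Notes on version B (the rewrite author's own statement) =====
-- stated objective: alternative
-- what changed: Replaces the fixed per-value chain of five if/add statements with a shrinking worklist of not-yet-satisfied rules: each value is matched only against the remaining rules, satisfied rules are removed, and the scan stops early once the worklist is empty; the result set is built from the ordered list of first hits.
import Mathlib
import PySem

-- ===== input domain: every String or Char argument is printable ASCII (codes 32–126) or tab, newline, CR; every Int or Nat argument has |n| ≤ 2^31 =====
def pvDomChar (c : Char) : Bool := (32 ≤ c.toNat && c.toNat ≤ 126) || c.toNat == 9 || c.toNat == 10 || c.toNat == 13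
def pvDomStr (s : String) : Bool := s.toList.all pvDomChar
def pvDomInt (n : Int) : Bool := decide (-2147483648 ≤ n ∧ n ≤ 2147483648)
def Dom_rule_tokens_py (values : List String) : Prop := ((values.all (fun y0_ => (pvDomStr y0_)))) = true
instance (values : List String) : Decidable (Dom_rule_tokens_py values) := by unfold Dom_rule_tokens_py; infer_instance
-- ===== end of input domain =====

-- B replaces A's fixed per-value chain of five if/add statements with a shrinking worklist of
-- not-yet-satisfied rules (early exit once empty); objective: alternative (same worst-case cost).


-- ===== PORT A =====
-- one value's step of A's loop: lower, then five conditional set.add's in source order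
def ruleStepA (tokens : PySem.Set String) (raw : String) : PySem.Set String :=
  let t := PySem.Str.lower raw
  let tokens := if PySem.Str.isIn "deterministic" t then PySem.Set.add tokens "deterministic" else tokens
  let tokens := if PySem.Str.isIn "stateless" t then PySem.Set.add tokens "stateless" else tokens
  let tokens := if PySem.Str.isIn "coherence" t then PySem.Set.add tokens "coherence_preserving" else tokens
  let tokens := if PySem.Str.isIn "sovereignty" t || PySem.Str.isIn "bridge_critical" t then PySem.Set.add tokens "bridge_critical" else tokens
  let tokens := if PySem.Str.isIn "latency" t then PySem.Set.add tokens "latency_bounded" else tokens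
  tokens

def rule_tokens_py (values : List String) : List String :=
  values.foldl ruleStepA PySem.Set.empty

-- ===== PORT B =====
def pvRuleSpecs : List (String × List String) :=
  [("deterministic", ["deterministic"]),
   ("stateless", ["stateless"]),
   ("coherence_preserving", ["coherence"]),
   ("bridge_critical", ["sovereignty", "bridge_critical"]),
   ("latency_bounded", ["latency"])]

-- any(s in t for s in spec[1])
def specHits (t : String) (spec : String × List String) : Bool :=
  spec.2.any (fun s => PySem.Str.isIn s t)

-- B's loop over values: worklist `remaining`, accumulator `found`, break when worklist empty
def altLoop (found : List String) (remaining : List (String × List String)) :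
    List String → List String
  | [] => found
  | raw :: rest =>
    if remaining.isEmpty then found
    else
      let t := PySem.Str.lower raw
      let hit := remaining.filter (specHits t)
      let remaining' := remaining.filter (fun spec => !(specHits t spec))
      altLoop (found ++ hit.map Prod.fst) remaining' rest

def rule_tokens_py_alt (values : List String) : List String :=
  PySem.Set.ofList (altLoop [] pvRuleSpecs values)

-- ===== PRECONDITION & SPEC =====
def Spec_rule_tokens_py (values : List String) (out : List String) : Prop := out = rule_tokens_py_alt values
instance (values : List String) (out : List String) : Decidable (Spec_rule_tokens_py values out) := by unfold Spec_rule_tokens_py; infer_instance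

-- ===== CLAIM (what is proved, stated in full; the proofs are below) =====
def Claim_equal_rule_tokens_py : Prop := ∀ (values : List String), Dom_rule_tokens_py values → Spec_rule_tokens_py values (rule_tokens_py values)

-- ===== LEMMAS AND PROOFS =====

-- the tokens one value contributes, in rule order
def matchedTokens (v : String) : List String :=
  (pvRuleSpecs.filter (specHits (PySem.Str.lower v))).map Prod.fst

-- A's per-value step equals updating the set with that value's matched tokens
theorem step_eq (s : PySem.Set String) (raw : String) :
    ruleStepA s raw = PySem.Set.update s (matchedTokens raw) := by
  unfold ruleStepA matchedTokens pvRuleSpecs specHits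
  simp only [List.filter_cons, List.filter_nil, List.any_cons, List.any_nil,
    Bool.or_false, Bool.or_eq_true]
  split_ifs <;> simp_all [PySem.Set.update]

theorem foldl_eq_update (values : List String) (s : PySem.Set String) :
    values.foldl ruleStepA s = PySem.Set.update s (values.flatMap matchedTokens) := by
  induction values generalizing s with
  | nil => simp [PySem.Set.update]
  | cons v vs ih =>
      simp only [List.foldl_cons, List.flatMap_cons, step_eq, ih, PySem.Set.update,
        List.foldl_append]

-- update by a nodup list appends exactly the fresh elements
theorem update_eq_append (s l : List String) (hl : l.Nodup) :
    PySem.Set.update s l = s ++ l.filter (fun x => !s.contains x) := by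
  induction l generalizing s with
  | nil => simp [PySem.Set.update]
  | cons a l ih =>
      simp only [List.nodup_cons] at hl
      have key : PySem.Set.update s (a :: l) = PySem.Set.update (PySem.Set.add s a) l := by
        simp [PySem.Set.update]
      rw [key]
      by_cases hmem : a ∈ s
      · have ha : PySem.Set.add s a = s := by
          simp [PySem.Set.add, PySem.Set.contains, hmem]
        rw [ha, ih s hl.2]
        simp [hmem]
      · have ha : PySem.Set.add s a = s ++ [a] := by
          simp [PySem.Set.add, PySem.Set.contains, hmem]
        rw [ha, ih _ hl.2]
        have hf : l.filter (fun x => !(s ++ [a]).contains x) = l.filter (fun x => !s.contains x) := by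
          apply List.filter_congr
          intro x hx
          have hne : x ≠ a := fun h => hl.1 (h ▸ hx)
          simp [List.contains_eq_mem, hne]
        rw [hf]
        simp [List.contains_eq_mem, hmem]

theorem update_of_subset (s l : List String) (h : ∀ x ∈ l, x ∈ s) :
    PySem.Set.update s l = s := by
  induction l generalizing s with
  | nil => rfl
  | cons a l ih =>
      have key : PySem.Set.update s (a :: l) = PySem.Set.update (PySem.Set.add s a) l := by
        simp [PySem.Set.update]
      have ha : PySem.Set.add s a = s := by
        simp [PySem.Set.add, PySem.Set.contains, h a List.mem_cons_self]
      rw [key, ha]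
      exact ih s (fun x hx => h x (List.mem_cons_of_mem a hx))

-- keys of pvRuleSpecs are distinct, so equal keys mean equal specs
theorem spec_key_inj (p q : String × List String) (hp : p ∈ pvRuleSpecs)
    (hq : q ∈ pvRuleSpecs) (h : p.1 = q.1) : p = q := by
  fin_cases hp <;> fin_cases hq <;> simp_all

-- main loop invariant: with the worklist = the rules whose token is not yet found,
-- B's loop computes exactly A's cumulative set update
theorem loop_eq (values : List String) (found : List String) (hnd : found.Nodup) :
    altLoop found (pvRuleSpecs.filter (fun p => !found.contains p.1)) values
      = PySem.Set.update found (values.flatMap matchedTokens) := by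
  induction values generalizing found with
  | nil => simp [altLoop, PySem.Set.update]
  | cons v vs ih =>
      simp only [altLoop, List.flatMap_cons]
      rw [PySem.Set.update, List.foldl_append, ← PySem.Set.update, ← PySem.Set.update]
      by_cases hempty : (pvRuleSpecs.filter (fun p => !found.contains p.1)).isEmpty = true
      · rw [if_pos hempty]
        have hall : ∀ p ∈ pvRuleSpecs, p.1 ∈ found := by
          intro p hp
          have := (List.filter_eq_nil_iff.mp (List.isEmpty_iff.mp hempty)) p hp
          simpa [List.contains_eq_mem] using this
        have h1 : PySem.Set.update found (matchedTokens v) = found := by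
          apply update_of_subset
          intro x hx
          simp only [matchedTokens, List.mem_map, List.mem_filter] at hx
          obtain ⟨p, ⟨hp, _⟩, rfl⟩ := hx
          exact hall p hp
        rw [h1]
        exact (update_of_subset found _ (by
          intro x hx
          simp only [List.mem_flatMap, matchedTokens, List.mem_map, List.mem_filter] at hx
          obtain ⟨_, _, p, ⟨hp, _⟩, rfl⟩ := hx
          exact hall p hp)).symm
      · rw [if_neg hempty]
        set t := PySem.Str.lower v with ht
        -- the hit tokens are exactly the fresh matched tokens of v
        have hmt_nodup : (matchedTokens v).Nodup := by
          have hkeys : (pvRuleSpecs.map Prod.fst).Nodup := by decide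
          have hsub : ((pvRuleSpecs.filter (specHits t)).map Prod.fst).Sublist
              (pvRuleSpecs.map Prod.fst) := List.Sublist.map _ (List.filter_sublist)
          simpa [matchedTokens, ht] using hsub.nodup hkeys
        have hhit :
            ((pvRuleSpecs.filter (fun p => !found.contains p.1)).filter (specHits t)).map Prod.fst
              = (matchedTokens v).filter (fun x => !found.contains x) := by
          simp only [matchedTokens, ← ht, List.filter_filter, List.filter_map]
          congr 1
          apply List.filter_congr
          intro p _
          simp [Bool.and_comm]
        have hfound' : found ++ ((pvRuleSpecs.filter (fun p => !found.contains p.1)).filter (specHits t)).map Prod.fst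
              = PySem.Set.update found (matchedTokens v) := by
          rw [hhit, update_eq_append found _ hmt_nodup]
        set found' := PySem.Set.update found (matchedTokens v) with hf'
        have hnd' : found'.Nodup := by
          rw [hf', update_eq_append found _ hmt_nodup]
          apply List.Nodup.append hnd (List.Nodup.filter _ hmt_nodup)
          intro x hx hx'
          have := (List.mem_filter.mp hx').2
          simp only [Bool.not_eq_eq_eq_not, Bool.not_true, List.contains_eq_mem,
            decide_eq_false_iff_not] at this
          exact this hx
        have hmemMT : ∀ p ∈ pvRuleSpecs, (p.1 ∈ matchedTokens v ↔ specHits t p = true) := by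
          intro p hp
          constructor
          · intro hmem
            simp only [matchedTokens, ← ht, List.mem_map] at hmem
            obtain ⟨q, hq, hq1⟩ := hmem
            rcases List.mem_filter.mp hq with ⟨hqmem, hqhit⟩
            rwa [spec_key_inj q p hqmem hp hq1] at hqhit
          · intro hm
            simp only [matchedTokens, ← ht, List.mem_map]
            exact ⟨p, List.mem_filter.mpr ⟨hp, hm⟩, rfl⟩
        have hmemF' : ∀ p ∈ pvRuleSpecs,
            (p.1 ∈ found' ↔ (p.1 ∈ found ∨ specHits t p = true)) := by
          intro p hp
          rw [hf', update_eq_append found _ hmt_nodup]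
          simp only [List.mem_append, List.mem_filter]
          constructor
          · rintro (h | ⟨h, _⟩)
            · exact Or.inl h
            · exact Or.inr ((hmemMT p hp).mp h)
          · rintro (h | h)
            · exact Or.inl h
            · by_cases hf : p.1 ∈ found
              · exact Or.inl hf
              · exact Or.inr ⟨(hmemMT p hp).mpr h, by simp [List.contains_eq_mem, hf]⟩
        have hrem :
            (pvRuleSpecs.filter (fun p => !found.contains p.1)).filter (fun spec => !(specHits t spec))
              = pvRuleSpecs.filter (fun p => !found'.contains p.1) := by
          rw [List.filter_filter]
          apply List.filter_congr
          intro p hp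
          have h1 := hmemF' p hp
          by_cases h2 : p.1 ∈ found <;> by_cases h3 : specHits t p = true <;>
            simp [PySem.Set.contains, List.contains_eq_mem, h1, h2, h3]
        rw [hfound', hrem]
        exact ih found' hnd'

-- ===== VERDICT (by name: the statement is the Claim_ definition above) =====
theorem rule_tokens_py_spec : Claim_equal_rule_tokens_py := by
  intro values _
  unfold Spec_rule_tokens_py rule_tokens_py rule_tokens_py_alt
  have h0 : pvRuleSpecs.filter (fun p => !([] : List String).contains p.1) = pvRuleSpecs := by
    simp
  rw [← h0, loop_eq values [] List.nodup_nil, foldl_eq_update]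
  have h1 : PySem.Set.update ([] : List String) (values.flatMap matchedTokens)
      = PySem.Set.ofList (values.flatMap matchedTokens) := rfl
  rw [h1, PySem.Set.ofList_ofList]
  rfl
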